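-- pv_equiv track=rewrite | github.com/kritika-kapoor/Mentor-Mate | ai_utils.py | _remove_non_technical
-- ===== SOURCE A (Python) =====
-- def _remove_non_technical(questions):
--     non_tech_triggers = [
--         "stay updated", "motivate", "ensure quality", "responsibilities",
--         "work ethic", "team environment", "communicate", "handle pressure",
--         "career goal", "strength", "weakness", "introduce yourself",
--         "why do you want", "where do you see", "tell me about yourself",
--         "how do you work with", "what drives you", "passion", "hobby",
--         "work life balance", "management style", "leadership style"
--     ]
--     clean = []
--     for q in questions:
--         q_lower = q.lower()
--         if not any(trigger in q_lower for trigger in non_tech_triggers):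
--             clean.append(q)
--     return clean
-- ===== SOURCE B (Python) =====
-- def _remove_non_technical(questions):
--     non_tech_triggers = [
--         "stay updated", "motivate", "ensure quality", "responsibilities",
--         "work ethic", "team environment", "communicate", "handle pressure",
--         "career goal", "strength", "weakness", "introduce yourself",
--         "why do you want", "where do you see", "tell me about yourself",
--         "how do you work with", "what drives you", "passion", "hobby",
--         "work life balance", "management style", "leadership style"
--     ]
--     # Inverted loop nesting: instead of testing every trigger per question,
--     # run one sifting pass per trigger over the list of still-surviving
--     # questions (paired with their lowered form, computed once).  A question
--     # survives all 22 sieves iff it contains no trigger, so the kept set and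
--     # order are identical to the per-question test.
--     survivors = [(q, q.lower()) for q in questions]
--     for t in non_tech_triggers:
--         survivors = [(q, ql) for (q, ql) in survivors if t not in ql]
--     return [q for (q, _) in survivors]
-- ===== Notes on version B (the rewrite author's own statement) =====
-- stated objective: alternative
-- what changed: Loop nesting is inverted: A loops over questions testing all 22 triggers per question with any(); B lowers each question once, then makes one sieving pass per trigger over the shrinking survivor list, so questions eliminated by an early trigger are never scanned by later ones; order is preserved because filtering passes commute.
import Mathlib
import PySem

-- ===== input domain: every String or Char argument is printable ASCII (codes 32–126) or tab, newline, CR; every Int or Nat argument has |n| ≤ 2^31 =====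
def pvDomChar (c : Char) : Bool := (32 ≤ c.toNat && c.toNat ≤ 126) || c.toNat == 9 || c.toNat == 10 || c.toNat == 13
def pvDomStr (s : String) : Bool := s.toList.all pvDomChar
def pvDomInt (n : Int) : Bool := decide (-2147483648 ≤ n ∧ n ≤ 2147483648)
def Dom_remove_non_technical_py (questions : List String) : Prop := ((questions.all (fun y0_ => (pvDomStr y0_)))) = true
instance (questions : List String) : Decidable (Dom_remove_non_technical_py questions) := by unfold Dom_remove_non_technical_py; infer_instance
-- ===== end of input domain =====

-- B inverts the loop nesting: one sieving pass per trigger over a shrinking survivor list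
-- (lowered once), instead of A's per-question any() over all 22 triggers; same return value.

-- ===== PORT A =====
-- the trigger list (shared literal data; both Pythons carry the identical list)
def pvTriggers : List String := [
    "stay updated", "motivate", "ensure quality", "responsibilities",
    "work ethic", "team environment", "communicate", "handle pressure",
    "career goal", "strength", "weakness", "introduce yourself",
    "why do you want", "where do you see", "tell me about yourself",
    "how do you work with", "what drives you", "passion", "hobby",
    "work life balance", "management style", "leadership style"]

def remove_non_technical_py (questions : List String) : List String :=
  -- for q in questions: q_lower = q.lower(); if not any(trigger in q_lower …): clean.append(q)
  questions.foldl (fun clean q =>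
    let q_lower := PySem.Str.lower q
    if !(pvTriggers.any (fun trigger => PySem.Str.isIn trigger q_lower)) then
      clean ++ [q]
    else clean) []

-- ===== PORT B =====
def remove_non_technical_py_alt (questions : List String) : List String :=
  -- survivors = [(q, q.lower()) for q in questions]
  let survivors := questions.map (fun q => (q, PySem.Str.lower q))
  -- for t in triggers: survivors = [(q, ql) for (q, ql) in survivors if t not in ql]
  let final := pvTriggers.foldl
    (fun surv t => surv.filter (fun p => !PySem.Str.isIn t p.2)) survivors
  -- return [q for (q, _) in survivors]
  final.map (fun p => p.1)

-- ===== PRECONDITION & SPEC =====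
def Spec_remove_non_technical_py (questions : List String) (out : List String) : Prop := out = remove_non_technical_py_alt questions
instance (questions : List String) (out : List String) : Decidable (Spec_remove_non_technical_py questions out) := by unfold Spec_remove_non_technical_py; infer_instance

-- ===== CLAIM (what is proved, stated in full; the proofs are below) =====
def Claim_equal_remove_non_technical_py : Prop := ∀ (questions : List String), Dom_remove_non_technical_py questions → Spec_remove_non_technical_py questions (remove_non_technical_py questions)

-- ===== LEMMAS AND PROOFS =====

-- staged per-trigger sieves = one filter by the conjunction of all sieves
theorem foldl_sieve (ts : List String) (l : List (String × String)) :
    ts.foldl (fun surv t => surv.filter (fun p => !PySem.Str.isIn t p.2)) l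
      = l.filter (fun p => ts.all (fun t => !PySem.Str.isIn t p.2)) := by
  induction ts generalizing l with
  | nil => simp
  | cons t ts ih =>
      simp only [List.foldl_cons, ih, List.filter_filter, List.all_cons]
      exact List.filter_congr fun a _ => Bool.and_comm _ _

-- ===== VERDICT (by name: the statement is the Claim_ definition above) =====
theorem remove_non_technical_py_spec : Claim_equal_remove_non_technical_py := by
  intro questions _
  show _ = _
  unfold remove_non_technical_py remove_non_technical_py_alt
  rw [PySem.List.foldl_append_if]
  simp only [List.nil_append, List.map_id', foldl_sieve, List.filter_map,
    List.map_map]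
  simp only [Function.comp_def, List.map_id']
  apply List.filter_congr
  intro q _
  rw [Bool.eq_iff_iff]
  simp [List.all_eq_true]
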